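-- pv_equiv track=rewrite | github.com/ClaudiaIoana/Python | a3-914-Claudia-Moisiuc/src/program.py | nr_day
-- ===== SOURCE A (Python) =====
-- def nr_day(list):
--     """
--     The function separates the first number from a text
--     :param list: the text
--     :return: the first natural number
--     """
--     i = 0
--     while list[i] < '0' or list[i] > '9':
--         i = i+1
--     nr = int(list[i])
--     i = i+1
--     while i < len(list) and '0' <= list[i] <= '9':
--         nr = nr*10+int(list[i])
--         i = i+1
--     return nr
-- ===== SOURCE B (Python) =====
-- import re
--
--
-- def nr_day(list):
--     return int(re.findall('[0-9]+', list)[0])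
-- ===== Notes on version B (the rewrite author's own statement) =====
-- stated objective: idiomatic
-- what changed: Replaces the two manual index-based while loops with a single regex extraction of the first contiguous ASCII digit run, converted with int().
import Mathlib
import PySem

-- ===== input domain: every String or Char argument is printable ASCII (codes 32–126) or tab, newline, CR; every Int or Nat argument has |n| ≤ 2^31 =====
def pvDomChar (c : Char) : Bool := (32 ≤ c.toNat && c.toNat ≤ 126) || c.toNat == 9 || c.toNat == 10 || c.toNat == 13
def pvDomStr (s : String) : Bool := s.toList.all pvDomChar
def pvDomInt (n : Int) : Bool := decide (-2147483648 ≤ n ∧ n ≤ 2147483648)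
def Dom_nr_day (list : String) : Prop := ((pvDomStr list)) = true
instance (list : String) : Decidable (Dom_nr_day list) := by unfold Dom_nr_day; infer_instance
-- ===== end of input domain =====

-- B replaces A's two manual index-based while loops with a regex extraction of the
-- first ASCII digit run (idiomatic, same cost).


-- ===== PORT A =====
-- first while loop: advance i while list[i] is not a digit (raises off the end; excluded by Pre_)
def nrDaySkip : List Char → List Char
  | [] => []
  | c :: rest => if c < '0' ∨ '9' < c then nrDaySkip rest else c :: rest

-- second while loop: nr = nr*10 + int(list[i]) while list[i] is a digit
def nrDayLoop : Int → List Char → Int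
  | nr, [] => nr
  | nr, c :: rest =>
      if '0' ≤ c ∧ c ≤ '9' then nrDayLoop (nr * 10 + ((c.toNat : Int) - 48)) rest
      else nr

def nr_day (list : String) : Int :=
  match nrDaySkip list.toList with
  | [] => 0   -- unreachable under Pre_nr_day: Python raises IndexError here
  | c :: rest => nrDayLoop ((c.toNat : Int) - 48) rest

-- ===== PORT B =====
-- re.findall('[0-9]+', list)[0]: the first maximal digit run = dropWhile non-digit, takeWhile digit
def nrDayRun (list : String) : List Char :=
  (list.toList.dropWhile (fun c => !c.isDigit)).takeWhile (fun c => c.isDigit)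

-- int(s) on a digit-only run: exact hand port of Python int() on that domain
def nr_day_alt (list : String) : Int :=
  (nrDayRun list).foldl (fun a c => a * 10 + ((c.toNat : Int) - 48)) 0

-- ===== PRECONDITION & SPEC =====
-- Pre_ excludes strings containing no ASCII digit: there A raises IndexError (first loop
-- runs off the end) and B raises IndexError too (findall returns []).
def Pre_nr_day (list : String) : Prop := (list.toList.any (fun c => '0' ≤ c && c ≤ '9')) = true
instance (list : String) : Decidable (Pre_nr_day list) := by unfold Pre_nr_day; infer_instance

def pvWitness_nr_day : String := "d7"

def Spec_nr_day (list : String) (out : Int) : Prop := out = nr_day_alt list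
instance (list : String) (out : Int) : Decidable (Spec_nr_day list out) := by unfold Spec_nr_day; infer_instance

-- ===== CLAIM (what is proved, stated in full; the proofs are below) =====
def Claim_equal_nr_day : Prop := ∀ (list : String), Dom_nr_day list → Pre_nr_day list → Spec_nr_day list (nr_day list)

-- ===== LEMMAS AND PROOFS =====

theorem isDigit_iff (c : Char) : c.isDigit = true ↔ ('0' ≤ c ∧ c ≤ '9') := by
  simp [Char.isDigit, Char.le_def]

theorem skip_eq_dropWhile (l : List Char) :
    nrDaySkip l = l.dropWhile (fun c => !c.isDigit) := by
  induction l with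
  | nil => rfl
  | cons c rest ih =>
    by_cases h : ('0' ≤ c ∧ c ≤ '9')
    · have hd : c.isDigit = true := (isDigit_iff c).mpr h
      simp [nrDaySkip, List.dropWhile, hd]
      intro hc
      rcases hc with hc | hc
      · exact absurd h.1 (not_le.mpr hc)
      · exact absurd h.2 (not_le.mpr hc)
    · have hd : c.isDigit = false := by
        cases hh : c.isDigit
        · rfl
        · exact absurd ((isDigit_iff c).mp hh) h
      have hlt : c < '0' ∨ '9' < c := by
        rcases not_and_or.mp h with h1 | h1
        · exact Or.inl (lt_of_not_ge h1)
        · exact Or.inr (lt_of_not_ge h1)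
      simp [nrDaySkip, List.dropWhile, hd, hlt, ih]

theorem loop_eq_foldl (nr : Int) (l : List Char) :
    nrDayLoop nr l =
      (l.takeWhile (fun c => c.isDigit)).foldl (fun a c => a * 10 + ((c.toNat : Int) - 48)) nr := by
  induction l generalizing nr with
  | nil => rfl
  | cons c rest ih =>
    by_cases h : ('0' ≤ c ∧ c ≤ '9')
    · have hd : c.isDigit = true := (isDigit_iff c).mpr h
      simp [nrDayLoop, List.takeWhile, hd, h, ih]
    · have hd : c.isDigit = false := by
        cases hh : c.isDigit
        · rfl
        · exact absurd ((isDigit_iff c).mp hh) h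
      simp [nrDayLoop, List.takeWhile, hd, h]

-- ===== VERDICT (by name: the statement is the Claim_ definition above) =====
theorem nr_day_spec : Claim_equal_nr_day := by
  intro list _ hpre
  unfold Spec_nr_day nr_day nr_day_alt nrDayRun
  rw [skip_eq_dropWhile]
  rcases hdw : list.toList.dropWhile (fun c => !c.isDigit) with _ | ⟨c, rest⟩
  · -- impossible: Pre_ guarantees a digit exists, so dropWhile is nonempty
    exfalso
    obtain ⟨d, hd, hdig'⟩ := List.any_eq_true.mp hpre
    have hdig : '0' ≤ d ∧ d ≤ '9' := by simpa using hdig'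
    have hdB : d.isDigit = true := (isDigit_iff d).mpr hdig
    have hall := List.dropWhile_eq_nil_iff.mp hdw
    have := hall d hd
    simp [hdB] at this
  · have hc : c.isDigit = true := by
      have := List.head?_dropWhile_not (p := fun c => !c.isDigit) list.toList
      rw [hdw] at this
      simpa using this
    have hcd : '0' ≤ c ∧ c ≤ '9' := (isDigit_iff c).mp hc
    rw [hdw]
    simp only [loop_eq_foldl]
    rw [List.takeWhile_cons_of_pos (by simp [hc])]
    simp
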